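-- pv_equiv track=rewrite | github.com/sattrr/Fine-Tuning-BERT-for-NER | app.py | merge_entities_iob
-- ===== SOURCE A (Python) =====
-- def merge_entities_iob(results):
--     entities = []
--     current_entity = ""
--     current_label = ""
--     iob_seq = []
--
--     for token, label in results:
--         if label.startswith("B-"):
--             if current_entity:
--                 entities.append((current_entity.strip(), current_label, " ".join(iob_seq)))
--             current_entity = token.replace("##", "")
--             current_label = label[2:]
--             iob_seq = [label]
--
--         elif label.startswith("I-") and current_label == label[2:]:
--             if token.startswith("##"):
--                 current_entity += token.replace("##", "")
--             else:
--                 current_entity += " " + token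
--             iob_seq.append(label)
--
--         else:
--             if current_entity:
--                 entities.append((current_entity.strip(), current_label, " ".join(iob_seq)))
--                 current_entity = ""
--                 current_label = ""
--                 iob_seq = []
--
--     if current_entity:
--         entities.append((current_entity.strip(), current_label, " ".join(iob_seq)))
--
--     return entities
-- ===== SOURCE B (Python) =====
-- def _segment(results):
--     # Pass 1: cut the tagged sequence into spans of raw (token, tag) pairs.
--     spans = []
--     label, pairs = "", []
--     for token, tag in results:
--         if tag.startswith("B-"):
--             if pairs:
--                 spans.append((label, pairs))
--             label, pairs = tag[2:], [(token, tag)]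
--         elif tag.startswith("I-") and tag[2:] == label:
--             pairs.append((token, tag))
--         elif pairs:
--             spans.append((label, pairs))
--             label, pairs = "", []
--     if pairs:
--         spans.append((label, pairs))
--     return spans
--
--
-- def _render(pairs):
--     # Rebuild one span's entity text from its wordpiece tokens.
--     text = ""
--     for token, tag in pairs:
--         if tag.startswith("B-"):
--             text = token.replace("##", "")
--         elif token.startswith("##"):
--             text += token.replace("##", "")
--         else:
--             text += " " + token
--     return text
--
--
-- def merge_entities_iob(results):
--     # Pass 2: render each span into its (entity, label, iob sequence) triple.
--     return [(_render(pairs).strip(), label, " ".join(tag for _, tag in pairs))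
--             for label, pairs in _segment(results)]
-- ===== Notes on version B (the rewrite author's own statement) =====
-- stated objective: alternative
-- what changed: Replaces A's single state machine that builds the entity string, label and IOB sequence incrementally with a two-pass decomposition (segment into raw (token,tag) spans, then render each span); Pre_ excludes inputs containing a token that vanishes under '##' stripping (empty or made only of '##' pairs) tagged 'B-...' or exactly 'I-', where A's truthiness test on the accumulated entity string accidentally drops the span and leaves the previous label open.
-- outside the precondition, e.g. on merge_entities_iob([('##', 'B-PER')]): A returns [], B returns [('', 'PER', 'B-PER')]; on merge_entities_iob([('##', 'I-')]): A returns [], B returns [('', '', 'I-')]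
import Mathlib
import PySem

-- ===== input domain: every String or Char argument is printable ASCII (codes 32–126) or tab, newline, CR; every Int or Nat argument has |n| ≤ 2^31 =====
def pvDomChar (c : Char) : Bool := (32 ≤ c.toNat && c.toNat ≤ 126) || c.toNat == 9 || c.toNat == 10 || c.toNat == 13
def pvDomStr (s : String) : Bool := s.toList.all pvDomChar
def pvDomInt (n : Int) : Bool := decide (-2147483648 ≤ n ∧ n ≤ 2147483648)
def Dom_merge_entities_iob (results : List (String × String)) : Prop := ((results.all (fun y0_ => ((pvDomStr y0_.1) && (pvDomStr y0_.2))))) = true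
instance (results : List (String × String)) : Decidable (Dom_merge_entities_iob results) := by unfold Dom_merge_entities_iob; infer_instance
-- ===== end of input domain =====

-- B replaces A's one-pass entity-string-building state machine by a two-pass decomposition
-- (segment into raw spans, then render each span); same values on Pre_, no speed claim.


-- ===== PORT A =====
-- A's state: (entities, current_entity, current_label, iob_seq); entity/label text kept as
-- List Char (PySem.Chars is the string layer), turned into String only when a triple is emitted.
def pvFlushA (st : List (String × String × String) × List Char × List Char × List (List Char)) :
    List (String × String × String) :=
  st.1 ++ [(String.ofList (PySem.Chars.strip st.2.1), String.ofList st.2.2.1,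
            String.ofList (PySem.Chars.join [' '] st.2.2.2))]

def pvStepA (st : List (String × String × String) × List Char × List Char × List (List Char))
    (p : String × String) :
    List (String × String × String) × List Char × List Char × List (List Char) :=
  let (entities, ce, cl, seq) := st
  let token := p.1.toList
  let label := p.2.toList
  if PySem.Chars.startswith label ['B', '-'] then
    let entities := if ce ≠ [] then pvFlushA (entities, ce, cl, seq) else entities
    (entities, PySem.Chars.replace token ['#', '#'] [], PySem.Chars.slice label (some 2) none,
     [label])
  else if PySem.Chars.startswith label ['I', '-'] &&
      cl == PySem.Chars.slice label (some 2) none then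
    let ce := if PySem.Chars.startswith token ['#', '#'] then
        ce ++ PySem.Chars.replace token ['#', '#'] []
      else ce ++ ' ' :: token
    (entities, ce, cl, seq ++ [label])
  else if ce ≠ [] then (pvFlushA (entities, ce, cl, seq), [], [], [])
  else (entities, ce, cl, seq)

def merge_entities_iob (results : List (String × String)) : List (String × String × String) :=
  let st := results.foldl pvStepA ([], [], [], [])
  if st.2.1 ≠ [] then pvFlushA st else st.1

-- ===== PORT B =====
-- B pass-2 helper: rebuild one span's entity text from its raw (token, tag) pairs.
def pvRender (pairs : List (List Char × List Char)) : List Char :=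
  pairs.foldl (fun text p =>
    if PySem.Chars.startswith p.2 ['B', '-'] then PySem.Chars.replace p.1 ['#', '#'] []
    else if PySem.Chars.startswith p.1 ['#', '#'] then text ++ PySem.Chars.replace p.1 ['#', '#'] []
    else text ++ ' ' :: p.1) []

-- B pass-1 step: segmentation state (spans, label, pairs).
def pvStepB (st : List (List Char × List (List Char × List Char)) × List Char ×
      List (List Char × List Char)) (p : String × String) :
    List (List Char × List (List Char × List Char)) × List Char ×
      List (List Char × List Char) :=
  let (spans, label, pairs) := st
  let token := p.1.toList
  let tag := p.2.toList
  if PySem.Chars.startswith tag ['B', '-'] then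
    let spans := if pairs ≠ [] then spans ++ [(label, pairs)] else spans
    (spans, PySem.Chars.slice tag (some 2) none, [(token, tag)])
  else if PySem.Chars.startswith tag ['I', '-'] &&
      PySem.Chars.slice tag (some 2) none == label then
    (spans, label, pairs ++ [(token, tag)])
  else if pairs ≠ [] then (spans ++ [(label, pairs)], [], [])
  else (spans, label, pairs)

-- B pass 2: render one span into its output triple.
def pvRenderSpan (sp : List Char × List (List Char × List Char)) : String × String × String :=
  (String.ofList (PySem.Chars.strip (pvRender sp.2)), String.ofList sp.1,
   String.ofList (PySem.Chars.join [' '] (sp.2.map Prod.snd)))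

def merge_entities_iob_alt (results : List (String × String)) : List (String × String × String) :=
  let st := results.foldl pvStepB ([], [], [])
  let spans := if st.2.2 ≠ [] then st.1 ++ [(st.2.1, st.2.2)] else st.1
  spans.map pvRenderSpan

-- ===== PRECONDITION & SPEC =====
-- Pre_ excludes inputs containing a token that vanishes under '##' stripping (empty or made
-- only of '##' pairs) tagged "B-…" or exactly "I-": there such a token can open a span whose
-- text is empty, and A's truthiness test on the accumulated entity string accidentally drops
-- the span and leaves the previous label open.
def Pre_merge_entities_iob (results : List (String × String)) : Prop :=
  ∀ p ∈ results,
    (PySem.Chars.startswith p.2.toList ['B', '-'] = true →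
      PySem.Chars.replace p.1.toList ['#', '#'] [] ≠ []) ∧
    (p.2.toList = ['I', '-'] → PySem.Chars.replace p.1.toList ['#', '#'] [] ≠ [])
instance (results : List (String × String)) : Decidable (Pre_merge_entities_iob results) := by
  unfold Pre_merge_entities_iob; infer_instance

def pvWitness_merge_entities_iob : (List (String × String)) :=
  [("John", "B-PER"), ("##son", "I-PER"), ("runs", "O")]

def Spec_merge_entities_iob (results : List (String × String)) (out : List (String × String × String)) : Prop := out = merge_entities_iob_alt results
instance (results : List (String × String)) (out : List (String × String × String)) : Decidable (Spec_merge_entities_iob results out) := by unfold Spec_merge_entities_iob; infer_instance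

-- ===== CLAIM (what is proved, stated in full; the proofs are below) =====
def Claim_equal_merge_entities_iob : Prop := ∀ (results : List (String × String)), Dom_merge_entities_iob results → Pre_merge_entities_iob results → Spec_merge_entities_iob results (merge_entities_iob results)

-- ===== LEMMAS AND PROOFS =====

-- Per-element form of Pre_: this pair's token does not vanish if tagged "B-…" or exactly "I-".
def pvOk (p : String × String) : Prop :=
  (PySem.Chars.startswith p.2.toList ['B', '-'] = true →
    PySem.Chars.replace p.1.toList ['#', '#'] [] ≠ []) ∧
  (p.2.toList = ['I', '-'] → PySem.Chars.replace p.1.toList ['#', '#'] [] ≠ [])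

-- The simulation relation between A's fold state and B's fold state; the last conjunct is
-- the Pre_-supplied bridge between A's emptiness test and B's.
def pvRel (a : List (String × String × String) × List Char × List Char × List (List Char))
    (b : List (List Char × List (List Char × List Char)) × List Char ×
      List (List Char × List Char)) : Prop :=
  a.1 = b.1.map pvRenderSpan ∧ a.2.1 = pvRender b.2.2 ∧ a.2.2.1 = b.2.1 ∧
    a.2.2.2 = b.2.2.map Prod.snd ∧ (pvRender b.2.2 = [] ↔ b.2.2 = []) ∧
    (b.2.2 = [] → b.2.1 = [])

theorem pvRender_singleton (t g : List Char)
    (hB : PySem.Chars.startswith g ['B', '-'] = true) :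
    pvRender [(t, g)] = PySem.Chars.replace t ['#', '#'] [] := by
  simp [pvRender, hB]

theorem pvRender_append (ps : List (List Char × List Char)) (t g : List Char)
    (hB : PySem.Chars.startswith g ['B', '-'] = false) :
    pvRender (ps ++ [(t, g)]) =
      if PySem.Chars.startswith t ['#', '#'] then
        pvRender ps ++ PySem.Chars.replace t ['#', '#'] []
      else pvRender ps ++ ' ' :: t := by
  simp [pvRender, List.foldl_append, hB]

theorem pvFlush_eq (S : List (List Char × List (List Char × List Char))) (cl : List Char)
    (ps : List (List Char × List Char)) :
    pvFlushA (S.map pvRenderSpan, pvRender ps, cl, ps.map Prod.snd) =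
      (S ++ [(cl, ps)]).map pvRenderSpan := by
  simp [pvFlushA, pvRenderSpan]

-- Under Pre_, a matching "I-…" tag seen with no open span must be the bare tag "I-".
theorem pvTag_II (t : List Char) (hI : PySem.Chars.startswith t ['I', '-'] = true)
    (hs : PySem.List.slice t (some 2) none = []) : t = ['I', '-'] := by
  obtain ⟨r, hr⟩ := (PySem.Chars.startswith_iff t ['I', '-']).mp hI
  subst hr
  simp [PySem.List.slice_from] at hs
  simp [hs]

theorem pvRel_step (a : List (String × String × String) × List Char × List Char × List (List Char))
    (b : List (List Char × List (List Char × List Char)) × List Char ×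
      List (List Char × List Char)) (p : String × String) (hp : pvOk p) (h : pvRel a b) :
    pvRel (pvStepA a p) (pvStepB b p) := by
  obtain ⟨A, ce, cl, seq⟩ := a
  obtain ⟨S, cl, ps⟩ := b
  obtain ⟨h1, h2, h3, h4, h5, h6⟩ := h
  simp only at h1 h2 h3 h4
  subst h1 h2 h3 h4
  simp only [pvStepA, pvStepB]
  by_cases hB : PySem.Chars.startswith p.2.toList ['B', '-'] = true
  · -- B- branch
    rw [if_pos hB, if_pos hB]
    have hnz : PySem.Chars.replace p.1.toList ['#', '#'] [] ≠ [] := hp.1 hB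
    refine ⟨?_, ?_, rfl, by simp, ?_, by simp⟩
    · by_cases hf : ps = []
      · rw [if_neg (by simp [h5.2 hf]), if_neg (by simp [hf])]
      · rw [if_pos (by simpa using fun h => hf (h5.1 h)), if_pos (by simpa using hf), pvFlush_eq]
    · rw [pvRender_singleton _ _ hB]
    · rw [pvRender_singleton _ _ hB]; simp [hnz]
  · have hBf : PySem.Chars.startswith p.2.toList ['B', '-'] = false := by simpa using hB
    rw [if_neg hB, if_neg hB]
    by_cases hI : PySem.Chars.startswith p.2.toList ['I', '-'] = true
    · by_cases hm : PySem.List.slice p.2.toList (some 2) none = cl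
      · -- matching I- branch
        have hcond : (PySem.Chars.startswith p.2.toList ['I', '-'] &&
            cl == PySem.Chars.slice p.2.toList (some 2) none) = true := by
          simp [hI]; exact hm.symm
        have hcond' : (PySem.Chars.startswith p.2.toList ['I', '-'] &&
            PySem.Chars.slice p.2.toList (some 2) none == cl) = true := by
          simp [hI]; exact hm
        rw [if_pos hcond, if_pos hcond']
        refine ⟨rfl, ?_, rfl, by simp, ?_, by simp⟩
        · rw [pvRender_append _ _ _ hBf]
        · constructor
          · intro hc
            exfalso
            rw [pvRender_append _ _ _ hBf] at hc
            by_cases hsw : PySem.Chars.startswith p.1.toList ['#', '#'] = true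
            · rw [if_pos hsw] at hc
              obtain ⟨hc1, hc2⟩ := List.append_eq_nil_iff.mp hc
              by_cases hf : ps = []
              · exact hp.2 (pvTag_II p.2.toList hI (hm.trans (h6 hf))) hc2
              · exact hf (h5.1 hc1)
            · rw [if_neg hsw] at hc
              simpa using (List.append_eq_nil_iff.mp hc).2
          · intro hc; simp at hc
      · -- I- with a non-matching label: the else branch fires in both programs
        have hcond : ¬ ((PySem.Chars.startswith p.2.toList ['I', '-'] &&
            cl == PySem.Chars.slice p.2.toList (some 2) none) = true) := by
          simp [hI]; exact fun h => (hm h.symm).elim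
        have hcond' : ¬ ((PySem.Chars.startswith p.2.toList ['I', '-'] &&
            PySem.Chars.slice p.2.toList (some 2) none == cl) = true) := by
          simp [hI]; exact hm
        rw [if_neg hcond, if_neg hcond']
        by_cases hf : ps = []
        · rw [if_neg (by simp [h5.2 hf]), if_neg (by simp [hf])]
          exact ⟨rfl, rfl, rfl, rfl, h5, h6⟩
        · rw [if_pos (by simpa using fun h => hf (h5.1 h)), if_pos (by simpa using hf), pvFlush_eq]
          exact ⟨rfl, rfl, rfl, rfl, by simp [pvRender], fun _ => rfl⟩
    · -- neither B- nor I-: the else branch fires in both programs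
      have hcond : ¬ ((PySem.Chars.startswith p.2.toList ['I', '-'] &&
          cl == PySem.Chars.slice p.2.toList (some 2) none) = true) := by simp [hI]
      have hcond' : ¬ ((PySem.Chars.startswith p.2.toList ['I', '-'] &&
          PySem.Chars.slice p.2.toList (some 2) none == cl) = true) := by simp [hI]
      rw [if_neg hcond, if_neg hcond']
      by_cases hf : ps = []
      · rw [if_neg (by simp [h5.2 hf]), if_neg (by simp [hf])]
        exact ⟨rfl, rfl, rfl, rfl, h5, h6⟩
      · rw [if_pos (by simpa using fun h => hf (h5.1 h)), if_pos (by simpa using hf), pvFlush_eq]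
        exact ⟨rfl, rfl, rfl, rfl, by simp [pvRender], fun _ => rfl⟩

theorem pvRel_foldl (results : List (String × String))
    (a : List (String × String × String) × List Char × List Char × List (List Char))
    (b : List (List Char × List (List Char × List Char)) × List Char ×
      List (List Char × List Char)) (hpre : ∀ p ∈ results, pvOk p) (h : pvRel a b) :
    pvRel (results.foldl pvStepA a) (results.foldl pvStepB b) := by
  induction results generalizing a b with
  | nil => exact h
  | cons p rest ih =>
    exact ih _ _ (fun q hq => hpre q (List.mem_cons_of_mem _ hq))
      (pvRel_step a b p (hpre p (List.mem_cons_self)) h)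

-- ===== VERDICT (by name: the statement is the Claim_ definition above) =====
theorem merge_entities_iob_spec : Claim_equal_merge_entities_iob := by
  intro results _ hpre
  unfold Spec_merge_entities_iob merge_entities_iob merge_entities_iob_alt
  have h := pvRel_foldl results ([], [], [], []) ([], [], []) hpre
    ⟨rfl, rfl, rfl, rfl, by simp [pvRender], fun _ => rfl⟩
  generalize hgA : List.foldl pvStepA ([], [], [], []) results = sa at h ⊢
  generalize hgB : List.foldl pvStepB ([], [], []) results = sb at h ⊢
  obtain ⟨A, ce, cl, seq⟩ := sa
  obtain ⟨S, lb, ps⟩ := sb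
  obtain ⟨h1, h2, h3, h4, h5, h6⟩ := h
  simp only at h1 h2 h3 h4
  subst h1 h2 h3 h4
  show (if pvRender ps ≠ [] then
          pvFlushA (List.map pvRenderSpan S, pvRender ps, cl, List.map Prod.snd ps)
        else List.map pvRenderSpan S) =
      List.map pvRenderSpan (if ps ≠ [] then S ++ [(cl, ps)] else S)
  by_cases hf : ps = []
  · rw [if_neg (by simp [h5.2 hf]), if_neg (by simp [hf])]
  · rw [if_pos (by simpa using fun h => hf (h5.1 h)), if_pos (by simpa using hf), pvFlush_eq]
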